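-- pv_equiv track=rewrite | github.com/sam-notte/notte | notte/utils/partition.py | partition
-- ===== SOURCE A (Python) =====
-- def partition(arr: list[int], gamma: int) -> list[list[int]]:
--     n = len(arr)
--
--     # dp to track minimum partitions
--     # dp[i] will store the minimum number of partitions for subarray up to index i
--     dp = [float("inf")] * n
--
--     # stores the indices where partitions start
--     partition_starts: list[list[list[int]]] = [[] for _ in range(n)]
--
--     # base case: first element
--     if arr[0] <= gamma:
--         dp[0] = 1
--         partition_starts[0] = [[0]]
--
--     # fill dp table
--     for i in range(1, n):
--         # try all possible last partition starting points
--         curr_sum = 0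
--         for j in range(i, -1, -1):
--             curr_sum += arr[j]
--
--             # if current sum exceeds gamma, break
--             if curr_sum > gamma:
--                 break
--
--             # calculate partitions up to j-1
--             prev_partitions = float("inf")
--             if j > 0:
--                 prev_partitions = dp[j - 1]
--             else:
--                 prev_partitions = 0
--
--             # update if we find a better partitioning
--             if prev_partitions + 1 < dp[i]:
--                 dp[i] = prev_partitions + 1
--
--                 # copy previous partitions and add current partition
--                 if j > 0:
--                     partition_starts[i] = [p + [j] for p in partition_starts[j - 1]]
--                 else:
--                     partition_starts[i] = [[j]]
--
--     # find the best partitioning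
--     if dp[n - 1] == float("inf"):
--         return []
--
--     # reconstruct the actual partitions
--     best_partitions = partition_starts[n - 1][0]
--     best_partitions.append(n)
--
--     # convert partition starts to actual partitions
--     result_partitions: list[list[int]] = []
--     for start, end in zip(best_partitions[:-1], best_partitions[1:]):
--         result_partitions.append(list(range(start, end)))
--
--     return result_partitions
-- ===== SOURCE B (Python) =====
-- def partition(arr: list[int], gamma: int) -> list[list[int]]:
--     # Same DP values and largest-j tie-break as A, but with back-pointer
--     # reconstruction instead of copying partition-start lists on every update.
--     n = len(arr)
--     inf = float("inf")
--     dp = [inf] * (n + 1)   # dp[k] = min partitions of the first k elements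
--     dp[0] = 0
--     parent = [-1] * (n + 1)
--     for i in range(n):
--         best = inf
--         bj = -1
--         curr_sum = 0
--         for j in range(i, -1, -1):
--             curr_sum += arr[j]
--             if curr_sum > gamma:
--                 break
--             if dp[j] + 1 < best:
--                 best = dp[j] + 1
--                 bj = j
--         dp[i + 1] = best
--         parent[i + 1] = bj
--     if dp[n] == inf:
--         return []
--     starts: list[int] = []
--     k = n
--     while k > 0:
--         p = parent[k]
--         starts = [p] + starts
--         k = p
--     starts.append(n)
--     return [list(range(s, e)) for s, e in zip(starts, starts[1:])]
-- ===== Notes on version B (the rewrite author's own statement) =====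
-- stated objective: alternative
-- what changed: B keeps one back-pointer per position and reconstructs the start chain once at the end, instead of A's per-cell lists of partition starts that are re-copied on every DP improvement; DP values and the largest-j tie-break are identical.
import Mathlib
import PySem

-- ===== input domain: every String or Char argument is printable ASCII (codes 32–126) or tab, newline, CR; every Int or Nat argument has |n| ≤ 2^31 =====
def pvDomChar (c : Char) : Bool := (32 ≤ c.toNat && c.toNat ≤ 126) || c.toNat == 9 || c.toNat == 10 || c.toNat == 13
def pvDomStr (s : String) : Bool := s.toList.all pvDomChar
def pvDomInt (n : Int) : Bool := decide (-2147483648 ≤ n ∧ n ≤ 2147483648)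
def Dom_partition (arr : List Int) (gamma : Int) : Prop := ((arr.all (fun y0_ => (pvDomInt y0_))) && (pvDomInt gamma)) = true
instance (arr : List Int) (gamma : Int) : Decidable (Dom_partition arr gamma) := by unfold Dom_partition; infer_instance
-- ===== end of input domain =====

-- B replaces A's per-cell copied lists of partition starts by one back-pointer per
-- position with a single reconstruction at the end (same DP values, same tie-break).

-- ===== PORT A =====
-- float("inf") is modelled by `none : Option Int`.  `pvLtInf v w` is Python's
-- `v + 1 < w` on these values: `inf + 1 < w` is false, `p + 1 < inf` is true.
def pvLtInf (v w : Option Int) : Bool :=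
  match v, w with
  | none, _ => false
  | some _, none => true
  | some p, some d => decide (p + 1 < d)

-- inner loop: `for j in range(i, -1, -1)` with `break` on curr_sum > gamma;
-- state st = (dp[i], partition_starts[i]).
def pvAInner (arr : List Int) (gamma : Int) (dp : List (Option Int))
    (parts : List (List (List Int))) :
    Nat → Int → Option Int × List (List Int) → Option Int × List (List Int)
  | j, currSum, st =>
    let currSum := currSum + arr.getD j 0
    if currSum > gamma then st
    else
      let prev : Option Int := if j > 0 then dp.getD (j-1) none else some 0
      let st' :=
        if pvLtInf prev st.1 then
          (some (prev.getD 0 + 1),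
           if j > 0 then (parts.getD (j-1) []).map (fun q => q ++ [((j:Nat):Int)]) else [[(0:Int)]])
        else st
      match j with
      | 0 => st'
      | j'+1 => pvAInner arr gamma dp parts j' currSum st'

-- outer loop: `for i in range(1, n)`
def pvAOuter (arr : List Int) (gamma : Int) :
    List Nat → List (Option Int) × List (List (List Int)) → List (Option Int) × List (List (List Int))
  | [], st => st
  | i :: rest, (dp, parts) =>
    let r := pvAInner arr gamma dp parts i 0 (dp.getD i none, parts.getD i [])
    pvAOuter arr gamma rest (dp.set i r.1, parts.set i r.2)

def partition (arr : List Int) (gamma : Int) : List (List Int) :=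
  let n := arr.length
  let dp : List (Option Int) := List.replicate n none
  let parts : List (List (List Int)) := List.replicate n []
  -- base case: first element (arr[0] raises on empty arr — excluded by Pre_)
  let st :=
    if arr.getD 0 0 ≤ gamma then (dp.set 0 (some 1), parts.set 0 [[(0:Int)]]) else (dp, parts)
  let st := pvAOuter arr gamma (List.range' 1 (n-1)) st
  match st.1.getD (n-1) none with
  | none => []
  | some _ =>
    let best := (st.2.getD (n-1) []).headD [] ++ [((n:Nat):Int)]
    -- zip(best[:-1], best[1:])
    (best.dropLast.zip best.tail).map (fun se => PySem.List.pyRange se.1 se.2 1)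

-- ===== PORT B =====
-- same inf-as-none modelling; state st = (best, bj)
def pvBInner (arr : List Int) (gamma : Int) (dp : List (Option Int)) :
    Nat → Int → Option Int × Int → Option Int × Int
  | j, currSum, st =>
    let currSum := currSum + arr.getD j 0
    if currSum > gamma then st
    else
      let st' :=
        if pvLtInf (dp.getD j none) st.1 then
          (some ((dp.getD j none).getD 0 + 1), ((j:Nat):Int))
        else st
      match j with
      | 0 => st'
      | j'+1 => pvBInner arr gamma dp j' currSum st'

-- outer loop: `for i in range(n)`
def pvBOuter (arr : List Int) (gamma : Int) :
    List Nat → List (Option Int) × List Int → List (Option Int) × List Int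
  | [], st => st
  | i :: rest, (dp, parent) =>
    let r := pvBInner arr gamma dp i 0 (none, -1)
    pvBOuter arr gamma rest (dp.set (i+1) r.1, parent.set (i+1) r.2)

-- `while k > 0: p = parent[k]; starts = [p] + starts; k = p` — k is kept as a Nat
-- (Python's k can end at -1 ≤ 0; `.toNat` sends it to 0, stopping identically);
-- fuel n+1 bounds the loop (parent[k] < k along the chain, so ≤ n iterations).
def pvBChain (parent : List Int) : Nat → Nat → List Int → List Int
  | 0, _, starts => starts
  | fuel+1, k, starts =>
    if k > 0 then
      let p := parent.getD k (-1)
      pvBChain parent fuel p.toNat (p :: starts)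
    else starts

def partition_alt (arr : List Int) (gamma : Int) : List (List Int) :=
  let n := arr.length
  let dp : List (Option Int) := some 0 :: List.replicate n none
  let parent : List Int := List.replicate (n+1) (-1)
  let st := pvBOuter arr gamma (List.range n) (dp, parent)
  match st.1.getD n none with
  | none => []
  | some _ =>
    let starts := pvBChain st.2 (n+1) n []
    let starts := starts ++ [((n:Nat):Int)]
    (starts.zip starts.tail).map (fun se => PySem.List.pyRange se.1 se.2 1)

-- ===== PRECONDITION & SPEC =====
-- Pre_ excludes only the empty list, on which A raises IndexError at arr[0].
def Pre_partition (arr : List Int) (gamma : Int) : Prop := arr ≠ []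
instance (arr : List Int) (gamma : Int) : Decidable (Pre_partition arr gamma) := by unfold Pre_partition; infer_instance

def pvWitness_partition : List Int × Int := ([1, 2, -1, 3], 3)

def Spec_partition (arr : List Int) (gamma : Int) (out : List (List Int)) : Prop := out = partition_alt arr gamma
instance (arr : List Int) (gamma : Int) (out : List (List Int)) : Decidable (Spec_partition arr gamma out) := by unfold Spec_partition; infer_instance

-- ===== CLAIM (what is proved, stated in full; the proofs are below) =====
def Claim_equal_partition : Prop := ∀ (arr : List Int) (gamma : Int), Dom_partition arr gamma → Pre_partition arr gamma → Spec_partition arr gamma (partition arr gamma)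

-- ===== LEMMAS AND PROOFS =====

-- the fuel-free reading of pvBChain: the chain of back-pointers from position k
def chainSpec (parent : List Int) (k : Nat) : List Int := pvBChain parent k k []

theorem pvBChain_zero (parent : List Int) : ∀ (fuel : Nat) (acc : List Int),
    pvBChain parent fuel 0 acc = acc := by
  intro fuel acc; cases fuel <;> simp [pvBChain]

theorem pvBChain_acc (parent : List Int) :
    ∀ (fuel k : Nat) (acc : List Int),
      pvBChain parent fuel k acc = pvBChain parent fuel k [] ++ acc := by
  intro fuel
  induction fuel with
  | zero => intro k acc; simp [pvBChain]
  | succ f ih =>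
    intro k acc
    by_cases hk : k > 0
    · rw [pvBChain, pvBChain, if_pos hk, if_pos hk]
      rw [ih _ (_ :: acc), ih _ [_]]
      simp
    · rw [pvBChain, pvBChain, if_neg hk, if_neg hk]; simp

theorem pvBChain_congr (p1 p2 : List Int) :
    ∀ (fuel k : Nat),
      (∀ k', 1 ≤ k' → k' ≤ k → p1.getD k' (-1) = p2.getD k' (-1)) →
      (∀ k', 1 ≤ k' → k' ≤ k → p2.getD k' (-1) < (k' : Int)) →
      pvBChain p1 fuel k [] = pvBChain p2 fuel k [] := by
  intro fuel
  induction fuel with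
  | zero => intro k _ _; rfl
  | succ f ih =>
    intro k hag hwf
    by_cases hk : k > 0
    · have he : p1.getD k (-1) = p2.getD k (-1) := hag k hk le_rfl
      have hlt : p2.getD k (-1) < (k : Int) := hwf k hk le_rfl
      have hsub : (p2.getD k (-1)).toNat ≤ k := by omega
      rw [pvBChain, pvBChain, if_pos hk, if_pos hk, he]
      rw [pvBChain_acc, pvBChain_acc p2]
      rw [ih _ (fun k' h1 h2 => hag k' h1 (le_trans h2 hsub))
            (fun k' h1 h2 => hwf k' h1 (le_trans h2 hsub))]
    · rw [pvBChain, pvBChain, if_neg hk, if_neg hk]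

theorem pvBChain_fuel (parent : List Int) :
    ∀ (k fuel : Nat), k ≤ fuel →
      (∀ k', 1 ≤ k' → k' ≤ k → parent.getD k' (-1) < (k' : Int)) →
      pvBChain parent fuel k [] = chainSpec parent k := by
  intro k
  induction k using Nat.strong_induction_on with
  | _ k ih =>
    intro fuel hf hwf
    cases k with
    | zero => rw [pvBChain_zero]; rfl
    | succ k' =>
      cases fuel with
      | zero => omega
      | succ f =>
        have hp : parent.getD (k' + 1) (-1) < ((k' + 1 : Nat) : Int) :=
          hwf (k' + 1) (by omega) le_rfl
        have hpt : (parent.getD (k' + 1) (-1)).toNat ≤ k' := by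
          push_cast at hp; omega
        show _ = pvBChain parent (k' + 1) (k' + 1) []
        rw [pvBChain, pvBChain, if_pos (Nat.succ_pos k'), if_pos (Nat.succ_pos k')]
        rw [pvBChain_acc, pvBChain_acc parent k']
        rw [ih (parent.getD (k' + 1) (-1)).toNat (by omega) f (by omega)
              (fun a b c => hwf a b (by omega)),
            ih (parent.getD (k' + 1) (-1)).toNat (by omega) k' (by omega)
              (fun a b c => hwf a b (by omega))]

theorem chainSpec_set (parentB : List Int) (i jb : Nat) (hjb : jb ≤ i)
    (hlen : i + 1 < parentB.length)
    (hwf : ∀ k', 1 ≤ k' → k' ≤ jb → parentB.getD k' (-1) < (k' : Int)) :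
    chainSpec (parentB.set (i + 1) (jb : Int)) (i + 1) =
      chainSpec parentB jb ++ [(jb : Int)] := by
  have hget : (parentB.set (i + 1) (jb : Int)).getD (i + 1) (-1) = (jb : Int) := by
    simp [List.getD, hlen]
  show pvBChain _ (i + 1) (i + 1) [] = _
  rw [pvBChain, if_pos (Nat.succ_pos i), hget]
  show pvBChain (parentB.set (i + 1) ((jb : Nat) : Int)) i jb [((jb : Nat) : Int)] = _
  rw [pvBChain_acc]
  have hagree : ∀ k', 1 ≤ k' → k' ≤ jb →
      (parentB.set (i + 1) (jb : Int)).getD k' (-1) = parentB.getD k' (-1) := by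
    intro k' h1 h2
    have hne : i + 1 ≠ k' := by omega
    simp [List.getD, hne]
  rw [pvBChain_congr _ parentB i jb hagree (fun a b c => hwf a b c)]
  rw [pvBChain_fuel parentB jb i (by omega) hwf]

theorem zip_dropLast_tail (l : List Int) : l.dropLast.zip l.tail = l.zip l.tail := by
  induction l with
  | nil => rfl
  | cons a t ih =>
    cases t with
    | nil => rfl
    | cons b t' =>
      simp only [List.tail_cons] at ih ⊢
      simp only [List.dropLast_cons₂, List.zip_cons_cons]
      rw [ih]

-- the outer-loop invariant tying A's dp/partition_starts to B's dp/parent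
def pvInv (n m : Nat) (dpA : List (Option Int)) (partsA : List (List (List Int)))
    (parentB : List Int) : Prop :=
  dpA.length = n ∧ partsA.length = n ∧ parentB.length = n + 1 ∧
  (∀ k, 1 ≤ k → parentB.getD k (-1) < (k : Int)) ∧
  (∀ t, m ≤ t → dpA.getD t none = none) ∧
  (∀ t, dpA.getD t none ≠ none → partsA.getD t [] = [chainSpec parentB (t + 1)])

theorem inner_eq (arr : List Int) (gamma : Int) (dpA : List (Option Int))
    (partsA : List (List (List Int))) (parentB : List Int) (i : Nat)
    (hparts : ∀ t, dpA.getD t none ≠ none → partsA.getD t [] = [chainSpec parentB (t + 1)]) :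
    ∀ (j : Nat) (cs : Int) (stA : Option Int × List (List Int)) (stB : Option Int × Int),
      j ≤ i → stA.1 = stB.1 →
      (stA.1 ≠ none → ∃ jb : Nat, jb ≤ i ∧ stB.2 = (jb : Int) ∧
        stA.2 = [chainSpec parentB jb ++ [(jb : Int)]]) →
      (pvAInner arr gamma dpA partsA j cs stA).1 = (pvBInner arr gamma (some 0 :: dpA) j cs stB).1 ∧
      ((pvBInner arr gamma (some 0 :: dpA) j cs stB).1 = none →
        pvBInner arr gamma (some 0 :: dpA) j cs stB = stB) ∧
      ((pvAInner arr gamma dpA partsA j cs stA).1 ≠ none →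
        ∃ jb : Nat, jb ≤ i ∧ (pvBInner arr gamma (some 0 :: dpA) j cs stB).2 = (jb : Int) ∧
          (pvAInner arr gamma dpA partsA j cs stA).2 = [chainSpec parentB jb ++ [(jb : Int)]]) := by
  intro j
  induction j with
  | zero =>
    rintro cs ⟨a1, a2⟩ ⟨b1, b2⟩ hji h1 h2
    have h1' : a1 = b1 := h1
    subst h1'
    have h2' : a1 ≠ none → ∃ jb : Nat, jb ≤ i ∧ b2 = (jb : Int) ∧
        a2 = [chainSpec parentB jb ++ [(jb : Int)]] := h2
    rw [pvAInner, pvBInner]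
    by_cases hc : cs + arr.getD 0 0 > gamma
    · simp only [if_pos hc]
      exact ⟨by simp, by simp, h2'⟩
    · simp only [if_neg hc, if_neg (show ¬ ((0 : Nat) > 0) by omega), List.getD_cons_zero]
      by_cases hlt : pvLtInf (some 0) a1 = true
      · simp only [if_pos hlt]
        exact ⟨by simp, by intro h; simp at h, fun _ => ⟨0, Nat.zero_le i, rfl, rfl⟩⟩
      · simp only [if_neg hlt]
        exact ⟨by simp, by simp, h2'⟩
  | succ j' ih =>
    rintro cs ⟨a1, a2⟩ ⟨b1, b2⟩ hji h1 h2
    have h1' : a1 = b1 := h1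
    subst h1'
    have h2' : a1 ≠ none → ∃ jb : Nat, jb ≤ i ∧ b2 = (jb : Int) ∧
        a2 = [chainSpec parentB jb ++ [(jb : Int)]] := h2
    rw [pvAInner, pvBInner]
    by_cases hc : cs + arr.getD (j' + 1) 0 > gamma
    · simp only [if_pos hc]
      exact ⟨by simp, by simp, h2'⟩
    · simp only [if_neg hc, if_pos (Nat.succ_pos j'), Nat.add_sub_cancel,
        List.getD_cons_succ]
      by_cases hlt : pvLtInf (dpA.getD j' none) a1 = true
      · simp only [if_pos hlt]
        have hne : dpA.getD j' none ≠ none := by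
          intro h; rw [h] at hlt; exact Bool.noConfusion hlt
        have hupd : (partsA.getD j' []).map (fun q => q ++ [((j' + 1 : Nat) : Int)]) =
            [chainSpec parentB (j' + 1) ++ [((j' + 1 : Nat) : Int)]] := by
          rw [hparts j' hne]; simp
        obtain ⟨c1, c2, c3⟩ := ih (cs + arr.getD (j' + 1) 0)
          (some ((dpA.getD j' none).getD 0 + 1),
            (partsA.getD j' []).map (fun q => q ++ [((j' + 1 : Nat) : Int)]))
          (some ((dpA.getD j' none).getD 0 + 1), ((j' + 1 : Nat) : Int))
          (by omega) rfl (fun _ => ⟨j' + 1, hji, rfl, hupd⟩)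
        refine ⟨c1, ?_, c3⟩
        intro h
        rw [c2 h] at h
        simp at h
      · simp only [if_neg hlt]
        exact ih (cs + arr.getD (j' + 1) 0) _ _ (by omega) rfl h2'

theorem outer_eq (arr : List Int) (gamma : Int) :
    ∀ (c m : Nat) (dpA : List (Option Int)) (partsA : List (List (List Int)))
      (parentB : List Int),
      1 ≤ m → m + c ≤ arr.length →
      pvInv arr.length m dpA partsA parentB →
      ∃ parentB',
        pvBOuter arr gamma (List.range' m c) (some 0 :: dpA, parentB) =
          (some 0 :: (pvAOuter arr gamma (List.range' m c) (dpA, partsA)).1, parentB') ∧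
        pvInv arr.length (m + c) (pvAOuter arr gamma (List.range' m c) (dpA, partsA)).1
          (pvAOuter arr gamma (List.range' m c) (dpA, partsA)).2 parentB' := by
  intro c
  induction c with
  | zero =>
    intro m dpA partsA parentB h1 h2 hinv
    exact ⟨parentB, rfl, by simpa using hinv⟩
  | succ c ih =>
    intro m dpA partsA parentB h1 h2 hinv
    obtain ⟨hlen1, hlen2, hlen3, hwf, hnone, hparts⟩ := hinv
    rw [List.range'_succ]
    have hdm : dpA.getD m none = none := hnone m le_rfl
    have hstep := inner_eq arr gamma dpA partsA parentB m hparts m 0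
      (dpA.getD m none, partsA.getD m []) (none, -1) le_rfl hdm
      (fun h => absurd hdm h)
    set rA := pvAInner arr gamma dpA partsA m 0 (dpA.getD m none, partsA.getD m []) with hrA
    set rB := pvBInner arr gamma (some 0 :: dpA) m 0 (none, -1) with hrB
    obtain ⟨hq1, hq2, hq3⟩ := hstep
    have hmlt : m < arr.length := by omega
    have hstepA : pvAOuter arr gamma (m :: List.range' (m + 1) c) (dpA, partsA) =
        pvAOuter arr gamma (List.range' (m + 1) c) (dpA.set m rA.1, partsA.set m rA.2) := by
      rw [pvAOuter]
    have hstepB : pvBOuter arr gamma (m :: List.range' (m + 1) c) (some 0 :: dpA, parentB) =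
        pvBOuter arr gamma (List.range' (m + 1) c)
          (some 0 :: dpA.set m rA.1, parentB.set (m + 1) rB.2) := by
      rw [pvBOuter]
      rw [List.set_cons_succ, hq1]
    rw [hstepA, hstepB]
    -- the new invariant at m + 1
    have hinv' : pvInv arr.length (m + 1) (dpA.set m rA.1) (partsA.set m rA.2)
        (parentB.set (m + 1) rB.2) := by
      refine ⟨by simp [hlen1], by simp [hlen2], by simp [hlen3], ?_, ?_, ?_⟩
      · intro k hk
        by_cases hkm : m + 1 = k
        · subst hkm
          have hset : (parentB.set (m + 1) rB.2).getD (m + 1) (-1) = rB.2 := by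
            simp [List.getD, show m + 1 < parentB.length by omega]
          rw [hset]
          rcases hb : rB.1 with _ | v
          · have : rB.2 = -1 := by rw [hq2 hb]
            rw [this]; push_cast; omega
          · have : rA.1 ≠ none := by rw [hq1, hb]; simp
            obtain ⟨jb, hjb, hb2, _⟩ := hq3 this
            rw [hb2]; push_cast; omega
        · rw [show (parentB.set (m + 1) rB.2).getD k (-1) = parentB.getD k (-1) by
            simp [List.getD, hkm]]
          exact hwf k hk
      · intro t ht
        rw [show (dpA.set m rA.1).getD t none = dpA.getD t none by
          simp [List.getD, show m ≠ t by omega]]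
        exact hnone t (by omega)
      · intro t hne
        by_cases htm : t = m
        · subst htm
          have hsetp : (partsA.set t rA.2).getD t [] = rA.2 := by
            simp [List.getD, show t < partsA.length by omega]
          have hsetd : (dpA.set t rA.1).getD t none = rA.1 := by
            simp [List.getD, show t < dpA.length by omega]
          rw [hsetp]
          rw [hsetd] at hne
          obtain ⟨jb, hjb, hb2, hA2⟩ := hq3 hne
          rw [hA2, hb2]
          rw [chainSpec_set parentB t jb hjb (by omega)
            (fun k' ha hb => hwf k' ha)]
        · have : dpA.getD t none ≠ none := by
            rw [show (dpA.set m rA.1).getD t none = dpA.getD t none by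
              simp [List.getD, show m ≠ t by omega]] at hne
            exact hne
          have htlt : t < m := by
            by_contra hge
            exact this (hnone t (by omega))
          rw [show (partsA.set m rA.2).getD t [] = partsA.getD t [] by
            simp [List.getD, show m ≠ t by omega]]
          rw [hparts t this]
          have : chainSpec (parentB.set (m + 1) rB.2) (t + 1) = chainSpec parentB (t + 1) := by
            show pvBChain _ (t + 1) (t + 1) [] = pvBChain _ (t + 1) (t + 1) []
            refine pvBChain_congr _ _ (t + 1) (t + 1) ?_ (fun k' ha hb => hwf k' ha)
            intro k' ha hb
            simp [List.getD, show m + 1 ≠ k' by omega]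
          rw [this]
    obtain ⟨parentB', hB, hI⟩ := ih (m + 1) (dpA.set m rA.1) (partsA.set m rA.2)
      (parentB.set (m + 1) rB.2) (by omega) (by omega) hinv'
    exact ⟨parentB', hB, by
      have : m + 1 + c = m + (c + 1) := by omega
      rwa [this] at hI⟩

-- ===== VERDICT (by name: the statement is the Claim_ definition above) =====
theorem init_inv (arr : List Int) (gamma : Int) (hn : 1 ≤ arr.length) :
    ∃ (dpA1 : List (Option Int)) (partsA1 : List (List (List Int))) (parentB1 : List Int),
      (if arr.getD 0 0 ≤ gamma then
          ((List.replicate arr.length (none : Option Int)).set 0 (some 1),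
           (List.replicate arr.length ([] : List (List Int))).set 0 [[(0 : Int)]])
        else (List.replicate arr.length none, List.replicate arr.length [])) = (dpA1, partsA1) ∧
      ((some 0 :: List.replicate arr.length (none : Option Int)).set 1
          (pvBInner arr gamma (some 0 :: List.replicate arr.length none) 0 0 (none, -1)).1,
       (List.replicate (arr.length + 1) (-1 : Int)).set 1
          (pvBInner arr gamma (some 0 :: List.replicate arr.length none) 0 0 (none, -1)).2) =
        (some 0 :: dpA1, parentB1) ∧
      pvInv arr.length 1 dpA1 partsA1 parentB1 := by
  have hr : pvBInner arr gamma (some 0 :: List.replicate arr.length none) 0 0 (none, -1) =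
      if 0 + arr.getD 0 0 > gamma then ((none : Option Int), (-1 : Int))
      else (some 1, ((0 : Nat) : Int)) := by
    rw [pvBInner]
    by_cases hc : (0 : Int) + arr.getD 0 0 > gamma
    · simp only [if_pos hc]
    · simp only [if_neg hc, List.getD_cons_zero]
      rfl
  by_cases hc : arr.getD 0 0 ≤ gamma
  · refine ⟨(List.replicate arr.length none).set 0 (some 1),
      (List.replicate arr.length []).set 0 [[(0 : Int)]],
      (List.replicate (arr.length + 1) (-1)).set 1 ((0 : Nat) : Int),
      by rw [if_pos hc], ?_, ?_, ?_, ?_, ?_, ?_, ?_⟩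
    · rw [hr, if_neg (by omega), List.set_cons_succ]
    · simp
    · simp
    · simp
    · intro k hk
      by_cases hk1 : (1 : Nat) = k
      · subst hk1
        have : ((List.replicate (arr.length + 1) (-1 : Int)).set 1 ((0 : Nat) : Int)).getD 1 (-1) =
            ((0 : Nat) : Int) := by
          simp [List.getD, show 1 < arr.length + 1 by omega]
        rw [this]; simp
      · have : ((List.replicate (arr.length + 1) (-1 : Int)).set 1 ((0 : Nat) : Int)).getD k (-1) =
            (List.replicate (arr.length + 1) (-1 : Int)).getD k (-1) := by
          simp [List.getD, hk1]
        rw [this]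
        rcases Nat.lt_or_ge k (arr.length + 1) with h | h
        · simp [List.getD, h]; omega
        · rw [List.getD_eq_default _ _ (by simpa [List.length_replicate] using h)]; omega
    · intro t ht
      have : ((List.replicate arr.length (none : Option Int)).set 0 (some 1)).getD t none =
          (List.replicate arr.length (none : Option Int)).getD t none := by
        simp [List.getD, show (0 : Nat) ≠ t by omega]
      rw [this]
      rcases Nat.lt_or_ge t arr.length with h | h
      · simp [List.getD, h]
      · exact List.getD_eq_default _ _ (by simpa using h)
    · intro t hne
      have ht0 : t = 0 := by
        by_contra h0
        apply hne
        have : ((List.replicate arr.length (none : Option Int)).set 0 (some 1)).getD t none =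
            (List.replicate arr.length (none : Option Int)).getD t none := by
          simp [List.getD, show (0 : Nat) ≠ t from fun h => h0 h.symm]
        rw [this]
        rcases Nat.lt_or_ge t arr.length with h | h
        · simp [List.getD, h]
        · exact List.getD_eq_default _ _ (by simpa using h)
      subst ht0
      have h1 : ((List.replicate arr.length ([] : List (List Int))).set 0 [[(0 : Int)]]).getD 0 [] =
          [[(0 : Int)]] := by
        simp [List.getD, show 0 < arr.length by omega]
      rw [h1]
      have h2 : chainSpec ((List.replicate (arr.length + 1) (-1 : Int)).set 1 ((0 : Nat) : Int)) 1 =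
          [(0 : Int)] := by
        show pvBChain _ 1 1 [] = _
        rw [pvBChain, if_pos (by omega : 0 < 1)]
        have : ((List.replicate (arr.length + 1) (-1 : Int)).set 1 ((0 : Nat) : Int)).getD 1 (-1) =
            ((0 : Nat) : Int) := by
          simp [List.getD, show 1 < arr.length + 1 by omega]
        rw [this]
        rfl
      rw [h2]
  · refine ⟨List.replicate arr.length none, List.replicate arr.length [],
      List.replicate (arr.length + 1) (-1),
      by rw [if_neg hc], ?_, ?_, ?_, ?_, ?_, ?_, ?_⟩
    · rw [hr, if_pos (by omega), List.set_cons_succ]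
      rw [List.set_replicate_self, List.set_replicate_self]
    · simp
    · simp
    · simp
    · intro k hk
      rcases Nat.lt_or_ge k (arr.length + 1) with h | h
      · simp [List.getD, h]; omega
      · rw [List.getD_eq_default _ _ (by simpa using h)]; omega
    · intro t ht
      rcases Nat.lt_or_ge t arr.length with h | h
      · simp [List.getD, h]
      · exact List.getD_eq_default _ _ (by simpa using h)
    · intro t hne
      exfalso
      apply hne
      rcases Nat.lt_or_ge t arr.length with h | h
      · simp [List.getD, h]
      · exact List.getD_eq_default _ _ (by simpa using h)

-- ===== VERDICT (by name: the statement is the Claim_ definition above) =====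
theorem partition_spec : Claim_equal_partition := by
  intro arr gamma _ hpre
  have hn : 1 ≤ arr.length := by
    cases arr with
    | nil => exact absurd rfl hpre
    | cons a t => simp
  unfold Spec_partition
  simp only [partition, partition_alt]
  obtain ⟨dpA1, partsA1, parentB1, hA1, hB1, hinv1⟩ := init_inv arr gamma hn
  -- unfold B's first iteration (i = 0) of the outer loop
  have hrange : List.range arr.length = 0 :: List.range' 1 (arr.length - 1) := by
    rw [List.range_eq_range', show arr.length = (arr.length - 1) + 1 by omega,
      List.range'_succ]
    simp
  rw [hrange, hA1]
  have hBstep : pvBOuter arr gamma (0 :: List.range' 1 (arr.length - 1))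
      (some 0 :: List.replicate arr.length none, List.replicate (arr.length + 1) (-1)) =
      pvBOuter arr gamma (List.range' 1 (arr.length - 1)) (some 0 :: dpA1, parentB1) := by
    rw [pvBOuter, hB1]
  rw [hBstep]
  obtain ⟨parentF, hBF, hinvF⟩ := outer_eq arr gamma (arr.length - 1) 1 dpA1 partsA1 parentB1
    le_rfl (by omega) hinv1
  rw [hBF]
  obtain ⟨hl1, hl2, hl3, hwfF, hnoneF, hpartsF⟩ := hinvF
  set dpF := (pvAOuter arr gamma (List.range' 1 (arr.length - 1)) (dpA1, partsA1)).1 with hdpF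
  set partsF := (pvAOuter arr gamma (List.range' 1 (arr.length - 1)) (dpA1, partsA1)).2 with hpartsFdef
  have hread : (some 0 :: dpF).getD arr.length none = dpF.getD (arr.length - 1) none := by
    rw [show arr.length = (arr.length - 1) + 1 by omega, List.getD_cons_succ]
    simp
  rw [hread]
  rcases hfin : dpF.getD (arr.length - 1) none with _ | v
  · rfl
  · have hne : dpF.getD (arr.length - 1) none ≠ none := by rw [hfin]; simp
    have hp := hpartsF (arr.length - 1) hne
    rw [show arr.length - 1 + 1 = arr.length by omega] at hp
    show ((((pvAOuter arr gamma (List.range' 1 (arr.length - 1)) (dpA1, partsA1)).2.getD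
        (arr.length - 1) []).headD [] ++ [((arr.length : Nat) : Int)]).dropLast.zip
        (((pvAOuter arr gamma (List.range' 1 (arr.length - 1)) (dpA1, partsA1)).2.getD
        (arr.length - 1) []).headD [] ++ [((arr.length : Nat) : Int)]).tail).map
        (fun se => PySem.List.pyRange se.1 se.2 1) = _
    rw [← hpartsFdef, hp]
    have hchain : pvBChain parentF (arr.length + 1) arr.length [] = chainSpec parentF arr.length :=
      pvBChain_fuel parentF arr.length (arr.length + 1) (by omega) (fun k' a b => hwfF k' a)
    rw [hchain]
    rw [zip_dropLast_tail]
    rfl
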